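-- pv_equiv track=rewrite | github.com/ReyTangerine/Team16Assignment9 | Deliverables/9/9.1/Backgammon_Class.py | removeHomeHome
-- ===== SOURCE A (Python) =====
-- def removeHomeHome(turns):
--     for turnNo in range(len(turns)):
--         turn = turns[turnNo]
--         toBeRemoved = []
--         for moveNo in range(len(turn)):
--             if turn[moveNo][0] == "home" and turn[moveNo][0] == "home":
--                 toBeRemoved.append(turn[moveNo])
--         if len(toBeRemoved) != 0:
--             for removeIt in toBeRemoved:
--                 turns[turnNo].remove(removeIt)
--     return turns
-- ===== SOURCE B (Python) =====
-- def removeHomeHome(turns):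
--     # Single-pass in-place two-pointer compaction per turn (same list objects, same return value; different algorithm, not measured faster).
--     for turn in turns:
--         w = 0
--         for move in turn:
--             if move[0] != "home":
--                 turn[w] = move
--                 w += 1
--         del turn[w:]
--     return turns
-- ===== Notes on version B (the rewrite author's own statement) =====
-- stated objective: alternative
-- what changed: Replaces A's three-phase per-turn processing (scan collecting a toBeRemoved list, then repeated list.remove calls) with a single-pass in-place two-pointer compaction that overwrites kept moves at a write index and truncates.
import Mathlib
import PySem

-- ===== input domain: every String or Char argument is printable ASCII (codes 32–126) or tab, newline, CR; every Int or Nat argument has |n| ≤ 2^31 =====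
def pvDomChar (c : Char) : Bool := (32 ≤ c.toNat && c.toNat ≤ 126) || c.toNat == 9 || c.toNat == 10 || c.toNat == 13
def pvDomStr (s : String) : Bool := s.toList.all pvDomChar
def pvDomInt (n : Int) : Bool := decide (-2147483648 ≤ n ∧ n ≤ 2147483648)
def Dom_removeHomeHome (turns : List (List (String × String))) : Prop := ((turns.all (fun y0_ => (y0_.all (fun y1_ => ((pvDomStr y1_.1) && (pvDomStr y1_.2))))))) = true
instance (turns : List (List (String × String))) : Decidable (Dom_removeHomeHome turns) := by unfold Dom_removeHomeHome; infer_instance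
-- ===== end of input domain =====

-- B replaces A's collect-then-repeated-remove per turn with a single-pass compaction;
-- A mutates `turns` in place and returns it — the equivalence proved here is about the return value only.

-- ===== PORT A =====
-- one step of A's `for removeIt in toBeRemoved: turns[turnNo].remove(removeIt)`;
-- Python's list.remove raises ValueError when absent; here each removed item was
-- collected from the list itself so remove? always succeeds and the `.getD t` default is unreachable.
def pvRemoveStep (t : List (String × String)) (m : String × String) : List (String × String) :=
  (PySem.List.remove? t m).getD t

def removeHomeHome (turns : List (List (String × String))) : List (List (String × String)) :=
  turns.map (fun turn =>
    let toBeRemoved := turn.foldl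
      (fun acc m => if m.1 == "home" && m.1 == "home" then acc ++ [m] else acc) []
    if toBeRemoved.length ≠ 0 then toBeRemoved.foldl pvRemoveStep turn else turn)

-- ===== PORT B =====
-- per-turn single pass: `acc` is the prefix of kept moves written at the write pointer
def removeHomeHome_alt (turns : List (List (String × String))) : List (List (String × String)) :=
  turns.map (fun turn =>
    turn.foldl (fun acc m => if m.1 != "home" then acc ++ [m] else acc) [])

-- ===== PRECONDITION & SPEC =====
def Spec_removeHomeHome (turns : List (List (String × String))) (out : List (List (String × String))) : Prop := out = removeHomeHome_alt turns
instance (turns : List (List (String × String))) (out : List (List (String × String))) : Decidable (Spec_removeHomeHome turns out) := by unfold Spec_removeHomeHome; infer_instance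

-- ===== CLAIM (what is proved, stated in full; the proofs are below) =====
def Claim_equal_removeHomeHome : Prop := ∀ (turns : List (List (String × String))), Dom_removeHomeHome turns → Spec_removeHomeHome turns (removeHomeHome turns)

-- ===== LEMMAS AND PROOFS =====

-- removing elements that all satisfy P from a list headed by a non-P element keeps the head
theorem pv_foldl_remove_cons (rs : List (String × String)) (a : String × String)
    (t : List (String × String)) (ha : ¬ a.1 = "home")
    (hrs : ∀ m ∈ rs, m.1 = "home") :
    rs.foldl pvRemoveStep (a :: t) = a :: rs.foldl pvRemoveStep t := by
  induction rs generalizing t with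
  | nil => rfl
  | cons r rs ih =>
    have hne : a ≠ r := by
      intro h; exact ha (h ▸ hrs r (by simp))
    have hstep : pvRemoveStep (a :: t) r = a :: pvRemoveStep t r := by
      unfold pvRemoveStep
      rw [PySem.List.remove?_cons_of_ne t hne]
      cases PySem.List.remove? t r <;> simp
    simp only [List.foldl_cons, hstep]
    exact ih _ (fun m hm => hrs m (by simp [hm]))

-- the "home" sublist of a list, as A collects it
theorem pv_collect_eq_filter (turn : List (String × String)) :
    turn.foldl (fun acc m => if m.1 == "home" && m.1 == "home" then acc ++ [m] else acc) []
      = turn.filter (fun m => m.1 == "home") := by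
  rw [PySem.List.foldl_append_if, List.nil_append]
  rw [List.map_id']
  apply List.filter_congr
  intro m _
  by_cases h : m.1 = "home" <;> simp [h]

-- removing exactly the "home" occurrences leaves the non-"home" ones
theorem pv_remove_all (turn : List (String × String)) :
    (turn.filter (fun m => m.1 == "home")).foldl pvRemoveStep turn
      = turn.filter (fun m => ¬ m.1 = "home") := by
  induction turn with
  | nil => rfl
  | cons a t ih =>
    by_cases h : a.1 = "home"
    · have e1 : (a :: t).filter (fun m => m.1 == "home")
          = a :: t.filter (fun m => m.1 == "home") := by simp [h]
      have e2 : (a :: t).filter (fun m => ¬ m.1 = "home")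
          = t.filter (fun m => ¬ m.1 = "home") := by simp [h]
      have hstep : pvRemoveStep (a :: t) a = t := by
        unfold pvRemoveStep; rw [PySem.List.remove?_cons_self]; rfl
      rw [e1, e2, List.foldl_cons, hstep]
      exact ih
    · have e1 : (a :: t).filter (fun m => m.1 == "home")
          = t.filter (fun m => m.1 == "home") := by simp [h]
      have e2 : (a :: t).filter (fun m => ¬ m.1 = "home")
          = a :: t.filter (fun m => ¬ m.1 = "home") := by simp [h]
      have hrs : ∀ m ∈ t.filter (fun m => m.1 == "home"), m.1 = "home" := by
        intro m hm
        simpa using List.of_mem_filter hm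
      rw [e1, e2, pv_foldl_remove_cons _ a t h hrs, ih]

-- B's per-turn single pass is the non-"home" filter
theorem pv_alt_eq_filter (turn : List (String × String)) :
    turn.foldl (fun acc m => if m.1 != "home" then acc ++ [m] else acc) []
      = turn.filter (fun m => ¬ m.1 = "home") := by
  rw [PySem.List.foldl_append_if]
  simp
  apply List.filter_congr
  intro m _
  by_cases h : m.1 = "home" <;> simp [h]

-- ===== VERDICT (by name: the statement is the Claim_ definition above) =====
theorem removeHomeHome_spec : Claim_equal_removeHomeHome := by
  intro turns _
  unfold Spec_removeHomeHome removeHomeHome removeHomeHome_alt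
  apply List.map_congr_left
  intro turn _
  rw [pv_collect_eq_filter, pv_alt_eq_filter]
  by_cases h : (turn.filter (fun m => m.1 == "home")).length ≠ 0
  · simp only [if_pos h]
    exact pv_remove_all turn
  · simp only [if_neg h]
    rw [Ne, not_not] at h
    have hall : ∀ m ∈ turn, ¬ m.1 = "home" := by
      intro m hm hhome
      have : m ∈ turn.filter (fun m => m.1 == "home") := by
        apply List.mem_filter.2 ⟨hm, by simp [hhome]⟩
      rw [List.length_eq_zero_iff] at h
      simp [h] at this
    symm
    exact List.filter_eq_self.2 (by intro m hm; simpa using hall m hm)
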